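-- pv_equiv track=rewrite | github.com/AndreaLK3/Multi-sense-LM | CreateEntities/SenseDenominations.py | get_denominations
-- ===== SOURCE A (Python) =====
-- def get_denominations(sorted_senses_lts):
--     denoms_lts = {}
--     count_noun = 1; count_verb = 1; count_adj = 1; count_adv = 1
--     for tpl in sorted_senses_lts:
--         bn_id = tpl[0]
--         if bn_id[-1]=='n':
--             denoms_lts[bn_id] = "noun."+str(count_noun)
--             count_noun = count_noun + 1
--         elif bn_id[-1]=='v':
--             denoms_lts[bn_id] = 'verb.' + str(count_verb)
--             count_verb = count_verb + 1
--         elif bn_id[-1]=='a':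
--             denoms_lts[bn_id] = 'adj.' + str(count_adj)
--             count_adj = count_adj + 1
--         elif bn_id[-1]=='r':
--             denoms_lts[bn_id] = 'adv.' + str(count_adv)
--             count_adv = count_adv + 1
--     return denoms_lts
-- ===== SOURCE B (Python) =====
-- def get_denominations(sorted_senses_lts):
--     # Partition by POS suffix: label each POS group by enumeration, then emit in input order.
--     labels = {}
--     for suffix, name in (('n', 'noun.'), ('v', 'verb.'), ('a', 'adj.'), ('r', 'adv.')):
--         group = [tpl[0] for tpl in sorted_senses_lts if tpl[0][-1] == suffix]
--         for i, bn_id in enumerate(group, 1):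
--             labels[bn_id] = name + str(i)
--     return {tpl[0]: labels[tpl[0]] for tpl in sorted_senses_lts if tpl[0] in labels}
-- ===== Notes on version B (the rewrite author's own statement) =====
-- stated objective: alternative
-- what changed: Replaces A's single interleaved pass with four explicit counters by a partition-by-POS scheme: for each suffix the matching ids are filtered out and enumerated from 1 to build a label table, and a final pass emits the labels in input order.
import Mathlib
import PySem

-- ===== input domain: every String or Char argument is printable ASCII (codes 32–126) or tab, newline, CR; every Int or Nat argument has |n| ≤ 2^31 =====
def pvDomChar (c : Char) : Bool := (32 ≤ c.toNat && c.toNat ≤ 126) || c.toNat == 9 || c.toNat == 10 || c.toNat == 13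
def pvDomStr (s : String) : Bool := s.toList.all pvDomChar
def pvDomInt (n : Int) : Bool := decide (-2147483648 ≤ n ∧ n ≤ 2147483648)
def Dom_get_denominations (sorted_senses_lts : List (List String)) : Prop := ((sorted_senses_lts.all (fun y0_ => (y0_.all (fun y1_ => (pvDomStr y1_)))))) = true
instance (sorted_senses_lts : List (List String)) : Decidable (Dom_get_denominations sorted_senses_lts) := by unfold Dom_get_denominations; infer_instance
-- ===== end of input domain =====

-- B replaces A's single interleaved pass with four counters by a partition-by-POS
-- scheme (filter + enumerate per POS, then emit in input order); objective: alternative.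

-- ===== PORT A =====
def get_denominations (sorted_senses_lts : List (List String)) : List (String × String) :=
  (sorted_senses_lts.foldl
    (fun (st : PySem.Dict String String × Int × Int × Int × Int) tpl =>
      let d := st.1
      let cn := st.2.1
      let cv := st.2.2.1
      let ca := st.2.2.2.1
      let cr := st.2.2.2.2
      let bn_id := (PySem.List.pyGet? tpl 0).getD ""
      match PySem.Str.pyGet? bn_id (-1) with
      | some c =>
        if c = 'n' then (d.insert bn_id ("noun." ++ PySem.Int.toStr cn), cn + 1, cv, ca, cr)
        else if c = 'v' then (d.insert bn_id ("verb." ++ PySem.Int.toStr cv), cn, cv + 1, ca, cr)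
        else if c = 'a' then (d.insert bn_id ("adj." ++ PySem.Int.toStr ca), cn, cv, ca + 1, cr)
        else if c = 'r' then (d.insert bn_id ("adv." ++ PySem.Int.toStr cr), cn, cv, ca, cr + 1)
        else (d, cn, cv, ca, cr)
      | none => (d, cn, cv, ca, cr))
    (PySem.Dict.empty, 1, 1, 1, 1)).1.items

-- ===== PORT B =====
def pvPosNames : List (Char × String) := [('n', "noun."), ('v', "verb."), ('a', "adj."), ('r', "adv.")]

def get_denominations_alt (sorted_senses_lts : List (List String)) : List (String × String) :=
  let labels : PySem.Dict String String :=
    pvPosNames.foldl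
      (fun labels sn =>
        let group := (sorted_senses_lts.filter
            (fun tpl => PySem.Str.pyGet? ((PySem.List.pyGet? tpl 0).getD "") (-1) == some sn.1)).map
            (fun tpl => (PySem.List.pyGet? tpl 0).getD "")
        (PySem.List.enumerate group 1).foldl
          (fun d p => d.insert p.2 (sn.2 ++ PySem.Int.toStr p.1)) labels)
      PySem.Dict.empty
  (sorted_senses_lts.foldl
    (fun d tpl =>
      let k := (PySem.List.pyGet? tpl 0).getD ""
      match labels.get? k with
      | some v => d.insert k v
      | none => d)
    PySem.Dict.empty).items

-- ===== PRECONDITION & SPEC =====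
-- Pre_ excludes exactly the inputs on which the Python raises IndexError:
-- an empty inner list (tpl[0]) or an empty id string (bn_id[-1]).
def Pre_get_denominations (sorted_senses_lts : List (List String)) : Prop :=
  ∀ tpl ∈ sorted_senses_lts, tpl ≠ [] ∧ tpl.headD "" ≠ ""
instance (sorted_senses_lts : List (List String)) : Decidable (Pre_get_denominations sorted_senses_lts) := by unfold Pre_get_denominations; infer_instance

def pvWitness_get_denominations : List (List String) := [["an", "x"], ["bv"], ["an"], ["cz"]]

def Spec_get_denominations (sorted_senses_lts : List (List String)) (out : List (String × String)) : Prop := out = get_denominations_alt sorted_senses_lts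
instance (sorted_senses_lts : List (List String)) (out : List (String × String)) : Decidable (Spec_get_denominations sorted_senses_lts out) := by unfold Spec_get_denominations; infer_instance

-- ===== CLAIM (what is proved, stated in full; the proofs are below) =====
def Claim_equal_get_denominations : Prop := ∀ (sorted_senses_lts : List (List String)), Dom_get_denominations sorted_senses_lts → Pre_get_denominations sorted_senses_lts → Spec_get_denominations sorted_senses_lts (get_denominations sorted_senses_lts)

-- ===== LEMMAS AND PROOFS =====

-- key and suffix extraction shared by both characterisations
def pvKey (tpl : List String) : String := (PySem.List.pyGet? tpl 0).getD ""
def pvSuf (s : String) : Option Char := PySem.Str.pyGet? s (-1)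

-- A's loop body as a named step function
def pvStepA (st : PySem.Dict String String × Int × Int × Int × Int) (tpl : List String) :
    PySem.Dict String String × Int × Int × Int × Int :=
  let d := st.1
  let cn := st.2.1
  let cv := st.2.2.1
  let ca := st.2.2.2.1
  let cr := st.2.2.2.2
  let bn_id := pvKey tpl
  match pvSuf bn_id with
  | some c =>
    if c = 'n' then (d.insert bn_id ("noun." ++ PySem.Int.toStr cn), cn + 1, cv, ca, cr)
    else if c = 'v' then (d.insert bn_id ("verb." ++ PySem.Int.toStr cv), cn, cv + 1, ca, cr)
    else if c = 'a' then (d.insert bn_id ("adj." ++ PySem.Int.toStr ca), cn, cv, ca + 1, cr)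
    else if c = 'r' then (d.insert bn_id ("adv." ++ PySem.Int.toStr cr), cn, cv, ca, cr + 1)
    else (d, cn, cv, ca, cr)
  | none => (d, cn, cv, ca, cr)

-- the sequence of (key, label) insertions A performs
def pvPairsA : List (List String) → Int → Int → Int → Int → List (String × String)
  | [], _, _, _, _ => []
  | tpl :: rest, cn, cv, ca, cr =>
    match pvSuf (pvKey tpl) with
    | some c =>
      if c = 'n' then (pvKey tpl, "noun." ++ PySem.Int.toStr cn) :: pvPairsA rest (cn + 1) cv ca cr
      else if c = 'v' then (pvKey tpl, "verb." ++ PySem.Int.toStr cv) :: pvPairsA rest cn (cv + 1) ca cr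
      else if c = 'a' then (pvKey tpl, "adj." ++ PySem.Int.toStr ca) :: pvPairsA rest cn cv (ca + 1) cr
      else if c = 'r' then (pvKey tpl, "adv." ++ PySem.Int.toStr cr) :: pvPairsA rest cn cv ca (cr + 1)
      else pvPairsA rest cn cv ca cr
    | none => pvPairsA rest cn cv ca cr

def pvIns (d : PySem.Dict String String) (ps : List (String × String)) : PySem.Dict String String :=
  ps.foldl (fun d p => d.insert p.1 p.2) d

def pvGroup (c : Char) (l : List (List String)) : List String :=
  (l.filter (fun tpl => pvSuf (pvKey tpl) == some c)).map pvKey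

def pvLabels (l : List (List String)) : PySem.Dict String String :=
  pvPosNames.foldl
    (fun labels sn =>
      (PySem.List.enumerate (pvGroup sn.1 l) 1).foldl
        (fun d p => d.insert p.2 (sn.2 ++ PySem.Int.toStr p.1)) labels)
    PySem.Dict.empty

def pvStepB (labels : PySem.Dict String String) (d : PySem.Dict String String) (tpl : List String) :
    PySem.Dict String String :=
  match labels.get? (pvKey tpl) with
  | some v => d.insert (pvKey tpl) v
  | none => d

def pvPairsB (labels : PySem.Dict String String) (l : List (List String)) : List (String × String) :=
  l.filterMap (fun tpl => (labels.get? (pvKey tpl)).map (fun v => (pvKey tpl, v)))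

-- last value inserted for a key
def pvLast {β : Type} (ps : List (String × β)) (k : String) : Option β :=
  ps.foldl (fun acc p => if p.1 = k then some p.2 else acc) none

def pvLastIdx (g : List String) (k : String) (start : Int) : Option Int :=
  pvLast ((PySem.List.enumerate g start).map (fun p => (p.2, p.1))) k

def pvValid : Option Char → Bool
  | some c => c = 'n' || c = 'v' || c = 'a' || c = 'r'
  | none => false

def pvVKeys (l : List (List String)) : List String :=
  l.filterMap (fun tpl => if pvValid (pvSuf (pvKey tpl)) then some (pvKey tpl) else none)

def pvOptLabel (l : List (List String)) (k : String) : Option String :=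
  if pvSuf k = some 'n' then (pvLastIdx (pvGroup 'n' l) k 1).map (fun i => "noun." ++ PySem.Int.toStr i)
  else if pvSuf k = some 'v' then (pvLastIdx (pvGroup 'v' l) k 1).map (fun i => "verb." ++ PySem.Int.toStr i)
  else if pvSuf k = some 'a' then (pvLastIdx (pvGroup 'a' l) k 1).map (fun i => "adj." ++ PySem.Int.toStr i)
  else if pvSuf k = some 'r' then (pvLastIdx (pvGroup 'r' l) k 1).map (fun i => "adv." ++ PySem.Int.toStr i)
  else none

def pvOptLabelG (l : List (List String)) (k : String) (cn cv ca cr : Int) : Option String :=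
  if pvSuf k = some 'n' then (pvLastIdx (pvGroup 'n' l) k cn).map (fun i => "noun." ++ PySem.Int.toStr i)
  else if pvSuf k = some 'v' then (pvLastIdx (pvGroup 'v' l) k cv).map (fun i => "verb." ++ PySem.Int.toStr i)
  else if pvSuf k = some 'a' then (pvLastIdx (pvGroup 'a' l) k ca).map (fun i => "adj." ++ PySem.Int.toStr i)
  else if pvSuf k = some 'r' then (pvLastIdx (pvGroup 'r' l) k cr).map (fun i => "adv." ++ PySem.Int.toStr i)
  else none

-- ---- pvLast toolkit ----
theorem pvLast_aux {β : Type} (k : String) (ps : List (String × β)) :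
    ∀ acc : Option β,
      ps.foldl (fun acc p => if p.1 = k then some p.2 else acc) acc = (pvLast ps k).or acc := by
  induction ps with
  | nil => intro acc; simp [pvLast]
  | cons p ps ih =>
    intro acc
    simp only [List.foldl_cons, pvLast]
    rw [ih, ih (if p.1 = k then some p.2 else none)]
    cases h : pvLast ps k <;> split <;> simp [Option.or]


theorem pvLast_cons {β : Type} (p : String × β) (ps : List (String × β)) (k : String) :
    pvLast (p :: ps) k = (pvLast ps k).or (if p.1 = k then some p.2 else none) := by
  simp only [pvLast, List.foldl_cons]
  rw [pvLast_aux]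
  rfl


theorem pvLast_isSome_iff {β : Type} (ps : List (String × β)) (k : String) :
    (pvLast ps k).isSome ↔ k ∈ ps.map Prod.fst := by
  induction ps with
  | nil => simp [pvLast]
  | cons p ps ih =>
    rw [pvLast_cons]
    cases h : pvLast ps k with
    | none =>
      rw [h] at ih; simp only [Option.isSome_none, Bool.false_eq_true, false_iff] at ih
      by_cases hp : p.1 = k
      · simp [hp, Option.or]
      · simp [hp, Option.or, ih, Ne.symm hp]
    | some w =>
      rw [h] at ih; simp only [Option.isSome_some, true_iff] at ih
      simp [Option.or, ih]

-- ---- Dict extensionality / insert congruence ----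
theorem pvDictExt (d1 d2 : PySem.Dict String String) (hk : d1.keys = d2.keys)
    (hnd : d1.keys.Nodup) (hget : ∀ k, d1.get? k = d2.get? k) : d1 = d2 := by
  have hnd2 : d2.keys.Nodup := hk ▸ hnd
  apply PySem.Dict.ext
  have hmapfst : d1.items.map Prod.fst = d2.items.map Prod.fst := by
    simpa [PySem.Dict.keys] using hk
  apply List.ext_getElem
  · simpa using congrArg List.length hmapfst
  · intro i h1 h2
    have hfst : (d1.items[i]).1 = (d2.items[i]).1 := by
      have h1' : i < (d1.items.map Prod.fst).length := by simpa using h1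
      have h2' : i < (d2.items.map Prod.fst).length := by simpa using h2
      have e1 : (d1.items.map Prod.fst)[i]'h1' = (d1.items[i]).1 := by simp
      have e2 : (d2.items.map Prod.fst)[i]'h2' = (d2.items[i]).1 := by simp
      rw [← e1, ← e2]
      simp [hmapfst]
    have hm1 : ((d1.items[i]).1, (d1.items[i]).2) ∈ d1.items := by
      simpa using List.getElem_mem h1
    have hm2 : ((d2.items[i]).1, (d2.items[i]).2) ∈ d2.items := by
      simpa using List.getElem_mem h2
    have g1 := PySem.Dict.get?_of_mem_items d1 hm1 hnd
    have g2 := PySem.Dict.get?_of_mem_items d2 hm2 hnd2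
    have hsnd : some (d1.items[i]).2 = some (d2.items[i]).2 := by
      rw [← g1, hfst, hget, g2]
    exact Prod.ext hfst (Option.some.inj hsnd)

theorem pvLast_eq_none_of_not_mem {β : Type} (ps : List (String × β)) (k : String)
    (h : k ∉ ps.map Prod.fst) : pvLast ps k = none := by
  cases e : pvLast ps k with
  | none => rfl
  | some w => exact absurd ((pvLast_isSome_iff ps k).mp (by simp [e])) h

theorem pvInsCong : ∀ (ps qs : List (String × String)) (d1 d2 : PySem.Dict String String),
    ps.map Prod.fst = qs.map Prod.fst →
    (∀ k, pvLast ps k = pvLast qs k) →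
    d1.keys = d2.keys → d1.keys.Nodup →
    (∀ k, k ∉ ps.map Prod.fst → d1.get? k = d2.get? k) →
    pvIns d1 ps = pvIns d2 qs := by
  intro ps
  induction ps with
  | nil =>
    intro qs d1 d2 hfst hlast hk hnd hget
    have hqs : qs = [] := List.map_eq_nil_iff.mp hfst.symm
    subst hqs
    simpa [pvIns] using pvDictExt d1 d2 hk hnd (fun k => hget k (by simp))
  | cons p ps ih =>
    intro qs d1 d2 hfst hlast hk hnd hget
    cases qs with
    | nil => simp at hfst
    | cons q qs' =>
      simp only [List.map_cons, List.cons.injEq] at hfst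
      obtain ⟨hq1, htl⟩ := hfst
      have hlast' : ∀ k, pvLast ps k = pvLast qs' k := by
        intro k
        by_cases hmem : k ∈ ps.map Prod.fst
        · have hmem' : k ∈ qs'.map Prod.fst := htl ▸ hmem
          have hik := hlast k
          rw [pvLast_cons, pvLast_cons] at hik
          cases e1 : pvLast ps k with
          | none => exact absurd ((pvLast_isSome_iff ps k).mpr hmem) (by simp [e1])
          | some w1 =>
            cases e2 : pvLast qs' k with
            | none => exact absurd ((pvLast_isSome_iff qs' k).mpr hmem') (by simp [e2])
            | some w2 => rw [e1, e2] at hik; simpa [Option.or] using hik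
        · have hmem' : k ∉ qs'.map Prod.fst := htl ▸ hmem
          rw [pvLast_eq_none_of_not_mem ps k hmem, pvLast_eq_none_of_not_mem qs' k hmem']
      have hkeq : d1.contains p.1 = d2.contains q.1 := by
        rw [hq1, PySem.Dict.contains_eq_decide_mem_keys, PySem.Dict.contains_eq_decide_mem_keys, hk]
      have hk' : (d1.insert p.1 p.2).keys = (d2.insert q.1 q.2).keys := by
        by_cases hc : d1.contains p.1 = true
        · rw [PySem.Dict.keys_insert_of_contains _ _ hc,
            PySem.Dict.keys_insert_of_contains _ _ (hkeq ▸ hc), hk]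
        · have hc1 : d1.contains p.1 = false := by simpa using hc
          rw [PySem.Dict.keys_insert_of_not_contains _ _ hc1,
            PySem.Dict.keys_insert_of_not_contains _ _ (hkeq ▸ hc1), hk, hq1]
      have hnd' := PySem.Dict.nodup_keys_insert d1 p.1 p.2 hnd
      have hget' : ∀ k, k ∉ ps.map Prod.fst →
          (d1.insert p.1 p.2).get? k = (d2.insert q.1 q.2).get? k := by
        intro k hkmem
        rw [PySem.Dict.get?_insert, PySem.Dict.get?_insert, ← hq1]
        by_cases hkp : k = p.1
        · simp only [hkp, if_true]
          have hik := hlast p.1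
          rw [pvLast_cons, pvLast_cons] at hik
          have en : pvLast ps p.1 = none := pvLast_eq_none_of_not_mem ps p.1 (hkp ▸ hkmem)
          have en' : pvLast qs' p.1 = none := (hlast' p.1).symm.trans en
          rw [en, en'] at hik
          simp [hq1, Option.or] at hik
          simp [hik]
        · simp only [if_neg hkp]
          exact hget k (by simp [hkmem, hkp])
      have hres := ih qs' (d1.insert p.1 p.2) (d2.insert q.1 q.2) htl hlast' hk' hnd' hget'
      simpa [pvIns, List.foldl_cons] using hres

-- ---- A-side characterisation ----
theorem pvA_eq_pairs (l : List (List String)) :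
    ∀ d cn cv ca cr, (l.foldl pvStepA (d, cn, cv, ca, cr)).1 = pvIns d (pvPairsA l cn cv ca cr) := by
  induction l with
  | nil => intro d cn cv ca cr; simp [pvPairsA, pvIns]
  | cons tpl rest ih =>
    intro d cn cv ca cr
    simp only [List.foldl_cons, pvStepA, pvPairsA]
    cases h : pvSuf (pvKey tpl) with
    | none => simp only [h]; exact ih d cn cv ca cr
    | some c =>
      simp only [h]
      split_ifs <;> simp only [pvIns, List.foldl_cons] <;> exact ih _ _ _ _ _


theorem pvA_eq (l : List (List String)) :
    get_denominations l = (pvIns PySem.Dict.empty (pvPairsA l 1 1 1 1)).items := by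
  have h0 : get_denominations l = ((l.foldl pvStepA (PySem.Dict.empty, 1, 1, 1, 1)).1).items := rfl
  rw [h0, pvA_eq_pairs]


theorem pvOr_map {α β : Type} (a b : Option α) (f : α → β) :
    (a.or b).map f = (a.map f).or (b.map f) := by
  cases a <;> cases b <;> rfl

theorem pvGroup_cons (c : Char) (t : List String) (l : List (List String)) :
    pvGroup c (t :: l) =
      if pvSuf (pvKey t) == some c then pvKey t :: pvGroup c l else pvGroup c l := by
  simp only [pvGroup, List.filter_cons]
  split <;> simp

theorem pvLastIdx_cons (x : String) (g : List String) (k : String) (s : Int) :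
    pvLastIdx (x :: g) k s = (pvLastIdx g k (s + 1)).or (if x = k then some s else none) := by
  simp only [pvLastIdx, PySem.List.enumerate_cons, List.map_cons]
  rw [pvLast_cons]

theorem pvLastIdx_eq_none_of_not_mem (g : List String) (k : String) (s : Int) (h : k ∉ g) :
    pvLastIdx g k s = none := by
  apply pvLast_eq_none_of_not_mem
  intro hmem
  apply h
  rw [List.map_map] at hmem
  have : ((PySem.List.enumerate g s).map (fun p => p.2)) = g := PySem.List.map_snd_enumerate g s
  rw [show (Prod.fst ∘ fun p : Int × String => (p.2, p.1)) = (fun p : Int × String => p.2) from rfl] at hmem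
  rwa [this] at hmem

theorem pvLastIdx_isSome_of_mem (g : List String) (k : String) (s : Int) (h : k ∈ g) :
    (pvLastIdx g k s).isSome := by
  rw [pvLastIdx, pvLast_isSome_iff, List.map_map]
  rw [show (Prod.fst ∘ fun p : Int × String => (p.2, p.1)) = (fun p : Int × String => p.2) from rfl]
  rwa [PySem.List.map_snd_enumerate g s]

theorem pvMem_group_suf (c : Char) (l : List (List String)) (k : String) (h : k ∈ pvGroup c l) :
    pvSuf k = some c := by
  simp only [pvGroup, List.mem_map, List.mem_filter] at h
  obtain ⟨tpl, ⟨-, hb⟩, rfl⟩ := h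
  exact eq_of_beq hb

theorem pvMem_group_of (c : Char) (l : List (List String)) (tpl : List String)
    (htpl : tpl ∈ l) (h : pvSuf (pvKey tpl) = some c) : pvKey tpl ∈ pvGroup c l := by
  simp only [pvGroup, List.mem_map, List.mem_filter]
  exact ⟨tpl, ⟨htpl, by simp [h]⟩, rfl⟩

theorem pvLastAGen (l : List (List String)) :
    ∀ (k : String) (cn cv ca cr : Int),
      pvLast (pvPairsA l cn cv ca cr) k = pvOptLabelG l k cn cv ca cr := by
  induction l with
  | nil =>
    intro k cn cv ca cr
    simp only [pvPairsA, pvOptLabelG, pvGroup, List.filter_nil, List.map_nil, pvLastIdx,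
      PySem.List.enumerate_nil, pvLast]
    simp
  | cons t rest ih =>
    intro k cn cv ca cr
    cases h : pvSuf (pvKey t) with
    | none =>
      simp only [pvPairsA, h]
      rw [ih]
      unfold pvOptLabelG
      rw [pvGroup_cons, pvGroup_cons, pvGroup_cons, pvGroup_cons]
      simp [h]
    | some c =>
      have hgroups : ∀ c', pvGroup c' (t :: rest) =
          if c = c' then pvKey t :: pvGroup c' rest else pvGroup c' rest := by
        intro c'
        rw [pvGroup_cons, h]
        by_cases hc : c = c' <;> simp [hc]
      have hne : ∀ c', pvSuf k = some c' → c' ≠ c → ¬(pvKey t = k) := by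
        intro c' hk hcc he
        rw [he, hk] at h
        exact hcc (Option.some.inj h)
      have hnone : pvSuf k = none → ¬(pvKey t = k) := by
        intro hk he
        rw [he, hk] at h
        simp at h
      by_cases h1 : c = 'n'
      · subst h1
        have hg1 : pvGroup 'n' (t :: rest) = pvKey t :: pvGroup 'n' rest := by
          rw [hgroups]; simp
        have hg2 : pvGroup 'v' (t :: rest) = pvGroup 'v' rest := by
          rw [hgroups]; simp
        have hg3 : pvGroup 'a' (t :: rest) = pvGroup 'a' rest := by
          rw [hgroups]; simp
        have hg4 : pvGroup 'r' (t :: rest) = pvGroup 'r' rest := by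
          rw [hgroups]; simp
        simp only [pvPairsA, h, Char.reduceEq, reduceIte]
        rw [pvLast_cons, ih]
        unfold pvOptLabelG
        simp only [hg1, hg2, hg3, hg4]
        by_cases hk1 : pvSuf k = some 'n'
        · simp only [if_pos hk1]
          rw [pvLastIdx_cons, pvOr_map]
          congr 1
          split <;> simp
        by_cases hk2 : pvSuf k = some 'v'
        · simp only [if_neg hk1, if_pos hk2]
          have hkt : ¬(pvKey t = k) := hne 'v' hk2 (by decide)
          simp [hkt, Option.or_none]
        by_cases hk3 : pvSuf k = some 'a'
        · simp only [if_neg hk1, if_neg hk2, if_pos hk3]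
          have hkt : ¬(pvKey t = k) := hne 'a' hk3 (by decide)
          simp [hkt, Option.or_none]
        by_cases hk4 : pvSuf k = some 'r'
        · simp only [if_neg hk1, if_neg hk2, if_neg hk3, if_pos hk4]
          have hkt : ¬(pvKey t = k) := hne 'r' hk4 (by decide)
          simp [hkt, Option.or_none]
        simp only [if_neg hk1, if_neg hk2, if_neg hk3, if_neg hk4]
        cases hk : pvSuf k with
        | none => simp [hnone hk, Option.or]
        | some ck =>
          have hck : ck ≠ 'n' := fun e => hk1 (by rw [hk, e])
          simp [hne ck hk hck, Option.or]
      by_cases h2 : c = 'v'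
      · subst h2
        have hg1 : pvGroup 'n' (t :: rest) = pvGroup 'n' rest := by
          rw [hgroups]; simp
        have hg2 : pvGroup 'v' (t :: rest) = pvKey t :: pvGroup 'v' rest := by
          rw [hgroups]; simp
        have hg3 : pvGroup 'a' (t :: rest) = pvGroup 'a' rest := by
          rw [hgroups]; simp
        have hg4 : pvGroup 'r' (t :: rest) = pvGroup 'r' rest := by
          rw [hgroups]; simp
        simp only [pvPairsA, h, Char.reduceEq, reduceIte]
        rw [pvLast_cons, ih]
        unfold pvOptLabelG
        simp only [hg1, hg2, hg3, hg4]
        by_cases hk1 : pvSuf k = some 'n'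
        · simp only [if_pos hk1]
          have hkt : ¬(pvKey t = k) := hne 'n' hk1 (by decide)
          simp [hkt, Option.or_none]
        by_cases hk2 : pvSuf k = some 'v'
        · simp only [if_neg hk1, if_pos hk2]
          rw [pvLastIdx_cons, pvOr_map]
          congr 1
          split <;> simp
        by_cases hk3 : pvSuf k = some 'a'
        · simp only [if_neg hk1, if_neg hk2, if_pos hk3]
          have hkt : ¬(pvKey t = k) := hne 'a' hk3 (by decide)
          simp [hkt, Option.or_none]
        by_cases hk4 : pvSuf k = some 'r'
        · simp only [if_neg hk1, if_neg hk2, if_neg hk3, if_pos hk4]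
          have hkt : ¬(pvKey t = k) := hne 'r' hk4 (by decide)
          simp [hkt, Option.or_none]
        simp only [if_neg hk1, if_neg hk2, if_neg hk3, if_neg hk4]
        cases hk : pvSuf k with
        | none => simp [hnone hk, Option.or]
        | some ck =>
          have hck : ck ≠ 'v' := fun e => hk2 (by rw [hk, e])
          simp [hne ck hk hck, Option.or]
      by_cases h3 : c = 'a'
      · subst h3
        have hg1 : pvGroup 'n' (t :: rest) = pvGroup 'n' rest := by
          rw [hgroups]; simp
        have hg2 : pvGroup 'v' (t :: rest) = pvGroup 'v' rest := by
          rw [hgroups]; simp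
        have hg3 : pvGroup 'a' (t :: rest) = pvKey t :: pvGroup 'a' rest := by
          rw [hgroups]; simp
        have hg4 : pvGroup 'r' (t :: rest) = pvGroup 'r' rest := by
          rw [hgroups]; simp
        simp only [pvPairsA, h, Char.reduceEq, reduceIte]
        rw [pvLast_cons, ih]
        unfold pvOptLabelG
        simp only [hg1, hg2, hg3, hg4]
        by_cases hk1 : pvSuf k = some 'n'
        · simp only [if_pos hk1]
          have hkt : ¬(pvKey t = k) := hne 'n' hk1 (by decide)
          simp [hkt, Option.or_none]
        by_cases hk2 : pvSuf k = some 'v'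
        · simp only [if_neg hk1, if_pos hk2]
          have hkt : ¬(pvKey t = k) := hne 'v' hk2 (by decide)
          simp [hkt, Option.or_none]
        by_cases hk3 : pvSuf k = some 'a'
        · simp only [if_neg hk1, if_neg hk2, if_pos hk3]
          rw [pvLastIdx_cons, pvOr_map]
          congr 1
          split <;> simp
        by_cases hk4 : pvSuf k = some 'r'
        · simp only [if_neg hk1, if_neg hk2, if_neg hk3, if_pos hk4]
          have hkt : ¬(pvKey t = k) := hne 'r' hk4 (by decide)
          simp [hkt, Option.or_none]
        simp only [if_neg hk1, if_neg hk2, if_neg hk3, if_neg hk4]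
        cases hk : pvSuf k with
        | none => simp [hnone hk, Option.or]
        | some ck =>
          have hck : ck ≠ 'a' := fun e => hk3 (by rw [hk, e])
          simp [hne ck hk hck, Option.or]
      by_cases h4 : c = 'r'
      · subst h4
        have hg1 : pvGroup 'n' (t :: rest) = pvGroup 'n' rest := by
          rw [hgroups]; simp
        have hg2 : pvGroup 'v' (t :: rest) = pvGroup 'v' rest := by
          rw [hgroups]; simp
        have hg3 : pvGroup 'a' (t :: rest) = pvGroup 'a' rest := by
          rw [hgroups]; simp
        have hg4 : pvGroup 'r' (t :: rest) = pvKey t :: pvGroup 'r' rest := by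
          rw [hgroups]; simp
        simp only [pvPairsA, h, Char.reduceEq, reduceIte]
        rw [pvLast_cons, ih]
        unfold pvOptLabelG
        simp only [hg1, hg2, hg3, hg4]
        by_cases hk1 : pvSuf k = some 'n'
        · simp only [if_pos hk1]
          have hkt : ¬(pvKey t = k) := hne 'n' hk1 (by decide)
          simp [hkt, Option.or_none]
        by_cases hk2 : pvSuf k = some 'v'
        · simp only [if_neg hk1, if_pos hk2]
          have hkt : ¬(pvKey t = k) := hne 'v' hk2 (by decide)
          simp [hkt, Option.or_none]
        by_cases hk3 : pvSuf k = some 'a'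
        · simp only [if_neg hk1, if_neg hk2, if_pos hk3]
          have hkt : ¬(pvKey t = k) := hne 'a' hk3 (by decide)
          simp [hkt, Option.or_none]
        by_cases hk4 : pvSuf k = some 'r'
        · simp only [if_neg hk1, if_neg hk2, if_neg hk3, if_pos hk4]
          rw [pvLastIdx_cons, pvOr_map]
          congr 1
          split <;> simp
        simp only [if_neg hk1, if_neg hk2, if_neg hk3, if_neg hk4]
        cases hk : pvSuf k with
        | none => simp [hnone hk, Option.or]
        | some ck =>
          have hck : ck ≠ 'r' := fun e => hk4 (by rw [hk, e])
          simp [hne ck hk hck, Option.or]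
      -- invalid POS character: nothing inserted
      simp only [pvPairsA, h, if_neg h1, if_neg h2, if_neg h3, if_neg h4]
      rw [ih]
      unfold pvOptLabelG
      simp only [hgroups, if_neg h1, if_neg h2, if_neg h3, if_neg h4]

theorem pvLastA (l : List (List String)) (k : String) :
    pvLast (pvPairsA l 1 1 1 1) k = pvOptLabel l k := by
  rw [pvLastAGen]
  rfl

theorem pvFstA (l : List (List String)) :
    ∀ cn cv ca cr, (pvPairsA l cn cv ca cr).map Prod.fst = pvVKeys l := by
  induction l with
  | nil => intro cn cv ca cr; simp [pvPairsA, pvVKeys]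
  | cons t rest ih =>
    intro cn cv ca cr
    cases h : pvSuf (pvKey t) with
    | none =>
      simp only [pvPairsA, h, pvVKeys, List.filterMap_cons, pvValid]
      simpa [pvVKeys] using ih cn cv ca cr
    | some c =>
      by_cases h1 : c = 'n'
      · subst h1
        simp [pvPairsA, h, pvVKeys, pvValid, ih (cn + 1) cv ca cr]
      by_cases h2 : c = 'v'
      · subst h2
        simp [pvPairsA, h, pvVKeys, pvValid, ih cn (cv + 1) ca cr]
      by_cases h3 : c = 'a'
      · subst h3
        simp [pvPairsA, h, pvVKeys, pvValid, ih cn cv (ca + 1) cr]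
      by_cases h4 : c = 'r'
      · subst h4
        simp [pvPairsA, h, pvVKeys, pvValid, ih cn cv ca (cr + 1)]
      simp [pvPairsA, h, pvVKeys, pvValid, h1, h2, h3, h4,
        ih cn cv ca cr]

-- ---- B-side characterisation ----
theorem pvPassGet (name : String) (g : List String) :
    ∀ (start : Int) (d : PySem.Dict String String) (k : String),
      ((PySem.List.enumerate g start).foldl
        (fun d p => d.insert p.2 (name ++ PySem.Int.toStr p.1)) d).get? k
      = match pvLastIdx g k start with
        | some i => some (name ++ PySem.Int.toStr i)
        | none => d.get? k := by
  induction g with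
  | nil => intro start d k; simp [PySem.List.enumerate_nil, pvLastIdx, pvLast]
  | cons x g ih =>
    intro start d k
    rw [PySem.List.enumerate_cons, List.foldl_cons, ih, pvLastIdx_cons]
    cases e : pvLastIdx g k (start + 1) with
    | some i => simp [Option.or]
    | none =>
      simp only [Option.or]
      rw [PySem.Dict.get?_insert]
      by_cases hk : k = x
      · simp [hk]
      · simp [hk, Ne.symm hk]

theorem pvLabels_get (l : List (List String)) (k : String) :
    (pvLabels l).get? k = pvOptLabel l k := by
  have h0 : pvLabels l =
      (PySem.List.enumerate (pvGroup 'r' l) 1).foldl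
        (fun d p => d.insert p.2 ("adv." ++ PySem.Int.toStr p.1))
        ((PySem.List.enumerate (pvGroup 'a' l) 1).foldl
          (fun d p => d.insert p.2 ("adj." ++ PySem.Int.toStr p.1))
          ((PySem.List.enumerate (pvGroup 'v' l) 1).foldl
            (fun d p => d.insert p.2 ("verb." ++ PySem.Int.toStr p.1))
            ((PySem.List.enumerate (pvGroup 'n' l) 1).foldl
              (fun d p => d.insert p.2 ("noun." ++ PySem.Int.toStr p.1))
              PySem.Dict.empty))) := rfl
  rw [h0, pvPassGet, pvPassGet, pvPassGet, pvPassGet]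
  have hnot : ∀ c : Char, pvSuf k ≠ some c → pvLastIdx (pvGroup c l) k 1 = none := by
    intro c hc
    exact pvLastIdx_eq_none_of_not_mem _ _ _ (fun hm => hc (pvMem_group_suf c l k hm))
  cases hk : pvSuf k with
  | none =>
    rw [hnot 'n' (by simp [hk]), hnot 'v' (by simp [hk]), hnot 'a' (by simp [hk]),
      hnot 'r' (by simp [hk])]
    simp [pvOptLabel, hk, PySem.Dict.get?_empty]
  | some c =>
    by_cases h1 : c = 'n'
    · subst h1
      rw [hnot 'v' (by simp [hk]), hnot 'a' (by simp [hk]), hnot 'r' (by simp [hk])]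
      simp only [pvOptLabel, hk, reduceIte]
      cases e : pvLastIdx (pvGroup 'n' l) k 1 <;> simp [PySem.Dict.get?_empty]
    by_cases h2 : c = 'v'
    · subst h2
      rw [hnot 'n' (by simp [hk]), hnot 'a' (by simp [hk]), hnot 'r' (by simp [hk])]
      simp only [pvOptLabel, hk, reduceIte]
      cases e : pvLastIdx (pvGroup 'v' l) k 1 <;> simp [PySem.Dict.get?_empty]
    by_cases h3 : c = 'a'
    · subst h3
      rw [hnot 'n' (by simp [hk]), hnot 'v' (by simp [hk]), hnot 'r' (by simp [hk])]
      simp only [pvOptLabel, hk, reduceIte]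
      cases e : pvLastIdx (pvGroup 'a' l) k 1 <;> simp [PySem.Dict.get?_empty]
    by_cases h4 : c = 'r'
    · subst h4
      rw [hnot 'n' (by simp [hk]), hnot 'v' (by simp [hk]), hnot 'a' (by simp [hk])]
      simp only [pvOptLabel, hk, reduceIte]
      cases e : pvLastIdx (pvGroup 'r' l) k 1 <;> simp [PySem.Dict.get?_empty]
    rw [hnot 'n' (by simp [hk, h1]), hnot 'v' (by simp [hk, h2]),
      hnot 'a' (by simp [hk, h3]), hnot 'r' (by simp [hk, h4])]
    simp [pvOptLabel, hk, h1, h2, h3, h4, PySem.Dict.get?_empty]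

theorem pvFoldB (labels : PySem.Dict String String) :
    ∀ (l : List (List String)) (d : PySem.Dict String String),
      l.foldl (pvStepB labels) d = pvIns d (pvPairsB labels l) := by
  intro l
  induction l with
  | nil => intro d; simp [pvPairsB, pvIns]
  | cons t rest ih =>
    intro d
    simp only [List.foldl_cons, pvPairsB, List.filterMap_cons]
    cases e : labels.get? (pvKey t) with
    | some v =>
      simp only [pvStepB, e, Option.map_some]
      rw [ih]
      rfl
    | none =>
      simp only [pvStepB, e, Option.map_none]
      exact ih d

theorem pvB_eq (l : List (List String)) :
    get_denominations_alt l = (pvIns PySem.Dict.empty (pvPairsB (pvLabels l) l)).items := by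
  have h0 : get_denominations_alt l = (l.foldl (pvStepB (pvLabels l)) PySem.Dict.empty).items := rfl
  rw [h0, pvFoldB]

theorem pvVKeys_of_group (c : Char) (l : List (List String)) (k : String)
    (hval : pvValid (some c) = true) (h : k ∈ pvGroup c l) : k ∈ pvVKeys l := by
  simp only [pvGroup, List.mem_map, List.mem_filter] at h
  obtain ⟨tpl, ⟨htpl, hb⟩, rfl⟩ := h
  simp only [pvVKeys, List.mem_filterMap]
  exact ⟨tpl, htpl, by simp [eq_of_beq hb, hval]⟩

theorem pvOptLabel_mem (l : List (List String)) (k : String)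
    (h : (pvOptLabel l k).isSome) : k ∈ pvVKeys l := by
  have step : ∀ (c : Char) (f : Int → String), pvValid (some c) = true →
      ((pvLastIdx (pvGroup c l) k 1).map f).isSome → k ∈ pvVKeys l := by
    intro c f hval hs
    have hs' : (pvLastIdx (pvGroup c l) k 1).isSome := by
      cases e : pvLastIdx (pvGroup c l) k 1 <;> simp [e] at hs ⊢
    by_cases hm : k ∈ pvGroup c l
    · exact pvVKeys_of_group c l k hval hm
    · rw [pvLastIdx_eq_none_of_not_mem _ _ _ hm] at hs'
      simp at hs'
  unfold pvOptLabel at h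
  split_ifs at h with h1 h2 h3 h4
  · exact step 'n' _ (by decide) h
  · exact step 'v' _ (by decide) h
  · exact step 'a' _ (by decide) h
  · exact step 'r' _ (by decide) h
  · simp at h

theorem pvFstB (l : List (List String)) :
    (pvPairsB (pvLabels l) l).map Prod.fst = pvVKeys l := by
  rw [pvPairsB, List.map_filterMap]
  apply List.filterMap_congr
  intro tpl htpl
  rw [pvLabels_get]
  simp only [Option.map_map]
  cases hk : pvSuf (pvKey tpl) with
  | none => simp [pvOptLabel, hk, pvValid]
  | some c =>
    by_cases h1 : c = 'n'
    · subst h1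
      have hs := pvLastIdx_isSome_of_mem _ (pvKey tpl) 1 (pvMem_group_of 'n' l tpl htpl hk)
      rcases Option.isSome_iff_exists.mp hs with ⟨i, hi⟩
      simp [pvOptLabel, hk, hi, pvValid]
    by_cases h2 : c = 'v'
    · subst h2
      have hs := pvLastIdx_isSome_of_mem _ (pvKey tpl) 1 (pvMem_group_of 'v' l tpl htpl hk)
      rcases Option.isSome_iff_exists.mp hs with ⟨i, hi⟩
      simp [pvOptLabel, hk, hi, pvValid]
    by_cases h3 : c = 'a'
    · subst h3
      have hs := pvLastIdx_isSome_of_mem _ (pvKey tpl) 1 (pvMem_group_of 'a' l tpl htpl hk)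
      rcases Option.isSome_iff_exists.mp hs with ⟨i, hi⟩
      simp [pvOptLabel, hk, hi, pvValid]
    by_cases h4 : c = 'r'
    · subst h4
      have hs := pvLastIdx_isSome_of_mem _ (pvKey tpl) 1 (pvMem_group_of 'r' l tpl htpl hk)
      rcases Option.isSome_iff_exists.mp hs with ⟨i, hi⟩
      simp [pvOptLabel, hk, hi, pvValid]
    simp [pvOptLabel, hk, h1, h2, h3, h4, pvValid]

theorem pvLast_of_fun (labels : PySem.Dict String String) :
    ∀ ps : List (String × String), (∀ p ∈ ps, labels.get? p.1 = some p.2) →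
      ∀ k, pvLast ps k = if k ∈ ps.map Prod.fst then labels.get? k else none := by
  intro ps
  induction ps with
  | nil => intro _ k; simp [pvLast]
  | cons p ps ih =>
    intro hmem k
    rw [pvLast_cons, ih (fun q hq => hmem q (List.mem_cons_of_mem p hq))]
    by_cases hk : k ∈ ps.map Prod.fst
    · rcases List.mem_map.mp hk with ⟨p', hp', rfl⟩
      have hv := hmem p' (List.mem_cons_of_mem p hp')
      simp [hk, hv, Option.or]
    · simp only [if_neg hk]
      by_cases hp : p.1 = k
      · have hv := hmem p List.mem_cons_self
        subst hp
        simp [hv, Option.or]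
      · simp [hp, hk, Option.or, Ne.symm hp]

theorem pvLastB (l : List (List String)) (k : String) :
    pvLast (pvPairsB (pvLabels l) l) k = pvOptLabel l k := by
  have hmem : ∀ p ∈ pvPairsB (pvLabels l) l, (pvLabels l).get? p.1 = some p.2 := by
    intro p hp
    simp only [pvPairsB, List.mem_filterMap] at hp
    obtain ⟨tpl, htpl, he⟩ := hp
    cases e : (pvLabels l).get? (pvKey tpl) with
    | none => rw [e] at he; simp at he
    | some v =>
      rw [e] at he
      simp only [Option.map_some, Option.some.injEq] at he
      cases he
      simpa using e
  rw [pvLast_of_fun _ _ hmem, pvFstB]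
  by_cases hk : k ∈ pvVKeys l
  · rw [if_pos hk, pvLabels_get]
  · rw [if_neg hk]
    cases e : pvOptLabel l k with
    | none => rfl
    | some v => exact absurd (pvOptLabel_mem l k (by simp [e])) hk

-- ===== VERDICT (by name: the statement is the Claim_ definition above) =====
theorem get_denominations_spec : Claim_equal_get_denominations := by
  intro l _ _
  unfold Spec_get_denominations
  rw [pvA_eq, pvB_eq]
  congr 1
  apply pvInsCong
  · rw [pvFstA, pvFstB]
  · intro k; rw [pvLastA, pvLastB]
  · rfl
  · simp [PySem.Dict.keys_empty]
  · intro k _; rfl
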